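-- pv_equiv track=rewrite | github.com/LongerHV/advent-of-code | 2023/python/day01_trebuchet/part2.py | get_digits_from_line
-- ===== SOURCE A (Python) =====
-- translations = {
--     "one": 1,
--     "two": 2,
--     "three": 3,
--     "four": 4,
--     "five": 5,
--     "six": 6,
--     "seven": 7,
--     "eight": 8,
--     "nine": 9,
-- }
--
-- def get_textual_digit_from_line_start(line: str) -> int | None:
--     for text, digit in translations.items():
--         if line.startswith(text):
--             return digit
--     return None
--
-- def get_digits_from_line(line: str) -> list[int]:
--     if not line:
--         return []
--     if line[0].isdigit():
--         digits = [int(line[0])]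
--     elif digit := get_textual_digit_from_line_start(line):
--         digits = [digit]
--     else:
--         digits = []
--     return digits + get_digits_from_line(line[1:])
-- ===== SOURCE B (Python) =====
-- _words = ["one", "two", "three", "four", "five", "six", "seven", "eight", "nine"]
--
-- def get_digits_from_line(line: str) -> list[int]:
--     digits = []
--     for i in range(len(line)):
--         c = line[i]
--         if c.isdigit():
--             digits.append(int(c))
--         else:
--             for value, word in enumerate(_words, 1):
--                 if line.startswith(word, i):
--                     digits.append(value)
--                     break
--     return digits
-- ===== Notes on version B (the rewrite author's own statement) =====
-- stated objective: faster
-- what changed: Replaced A's recursion on line[1:] slices (quadratic copying) by a single index loop that tests spelled-out digits with startswith(word, i) at each offset, appending to one accumulator list.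
import Mathlib
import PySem

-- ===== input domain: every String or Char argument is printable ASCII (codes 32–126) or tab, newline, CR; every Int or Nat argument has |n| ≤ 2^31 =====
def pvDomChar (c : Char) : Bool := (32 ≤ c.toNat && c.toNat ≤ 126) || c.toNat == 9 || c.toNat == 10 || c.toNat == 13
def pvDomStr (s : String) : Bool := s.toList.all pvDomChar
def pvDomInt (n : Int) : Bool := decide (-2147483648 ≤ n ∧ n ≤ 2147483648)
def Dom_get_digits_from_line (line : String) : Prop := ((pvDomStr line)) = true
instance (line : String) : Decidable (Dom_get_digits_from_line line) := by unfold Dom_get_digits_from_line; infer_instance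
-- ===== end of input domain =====

-- B replaces A's recursion on line[1:] slices by one index loop matching words at offsets; objective: faster.

-- ===== PORT A =====
-- A's dict lookup loop over `translations`, as the ordered chain of startswith tests
-- (the walrus truthiness test `digit := …` is exact here since every dict value is nonzero).
def get_textual_digit_from_line_start (l : List Char) : Option Int :=
  if "one".toList.isPrefixOf l then some 1
  else if "two".toList.isPrefixOf l then some 2
  else if "three".toList.isPrefixOf l then some 3
  else if "four".toList.isPrefixOf l then some 4
  else if "five".toList.isPrefixOf l then some 5
  else if "six".toList.isPrefixOf l then some 6
  else if "seven".toList.isPrefixOf l then some 7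
  else if "eight".toList.isPrefixOf l then some 8
  else if "nine".toList.isPrefixOf l then some 9
  else none

-- A's recursion: head test, then recurse on line[1:].
-- Char.isDigit = Python str.isdigit on the printable-ASCII domain; int(c) = code − 48.
def pvAGo : List Char → List Int
  | [] => []
  | c :: rest =>
      (if c.isDigit then [((c.toNat : Int) - 48)]
       else
         match get_textual_digit_from_line_start (c :: rest) with
         | some d => [d]
         | none => []) ++ pvAGo rest

def get_digits_from_line (line : String) : List Int := pvAGo line.toList

-- ===== PORT B =====
-- B's word table with the values `enumerate(_words, 1)` assigns.
def pvWords : List (String × Int) :=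
  [("one", 1), ("two", 2), ("three", 3), ("four", 4), ("five", 5),
   ("six", 6), ("seven", 7), ("eight", 8), ("nine", 9)]

-- one iteration of B's `for i in range(len(line))` loop body;
-- `line.startswith(word, i)` is `word.toList.isPrefixOf (l.drop i)`.
def pvBStep (l : List Char) (acc : List Int) (i : Nat) : List Int :=
  match l.drop i with
  | [] => acc
  | c :: rest =>
      if c.isDigit then acc ++ [((c.toNat : Int) - 48)]
      else
        match pvWords.find? (fun wv => wv.1.toList.isPrefixOf (c :: rest)) with
        | some wv => acc ++ [wv.2]
        | none => acc

def get_digits_from_line_alt (line : String) : List Int :=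
  (List.range line.toList.length).foldl (pvBStep line.toList) []

-- ===== PRECONDITION & SPEC =====
def Spec_get_digits_from_line (line : String) (out : List Int) : Prop := out = get_digits_from_line_alt line
instance (line : String) (out : List Int) : Decidable (Spec_get_digits_from_line line out) := by unfold Spec_get_digits_from_line; infer_instance

-- ===== CLAIM (what is proved, stated in full; the proofs are below) =====
def Claim_equal_get_digits_from_line : Prop := ∀ (line : String), Dom_get_digits_from_line line → Spec_get_digits_from_line line (get_digits_from_line line)

-- ===== LEMMAS AND PROOFS =====

-- the digits contributed at one suffix (proof-only helper)
def pvEmit : List Char → List Int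
  | [] => []
  | c :: rest =>
      if c.isDigit then [((c.toNat : Int) - 48)]
      else
        match get_textual_digit_from_line_start (c :: rest) with
        | some d => [d]
        | none => []

-- B's find? over the literal table is A's if-chain
theorem pv_find_eq (s : List Char) :
    (pvWords.find? (fun wv => wv.1.toList.isPrefixOf s)).map (·.2)
      = get_textual_digit_from_line_start s := by
  simp only [pvWords, List.find?, get_textual_digit_from_line_start]
  repeat' split
  all_goals simp_all

theorem pvBStep_emit (l : List Char) (acc : List Int) (i : Nat) :
    pvBStep l acc i = acc ++ pvEmit (l.drop i) := by
  unfold pvBStep pvEmit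
  cases h : l.drop i with
  | nil => simp
  | cons c rest =>
      by_cases hd : c.isDigit
      · simp [hd]
      · have := pv_find_eq (c :: rest)
        simp only [hd]
        cases hf : pvWords.find? (fun wv => wv.1.toList.isPrefixOf (c :: rest)) with
        | none => rw [hf] at this; simp at this; simp [← this]
        | some wv => rw [hf] at this; simp at this; simp [← this]

theorem pvAGo_eq_flatten (l : List Char) :
    pvAGo l = ((List.range l.length).map (fun i => pvEmit (l.drop i))).flatten := by
  induction l with
  | nil => simp [pvAGo]
  | cons c rest ih =>
      rw [show (c :: rest).length = rest.length + 1 from rfl, List.range_succ_eq_map]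
      simp only [List.map_cons, List.map_map, List.flatten_cons]
      have hmap : (List.range rest.length).map ((fun i => pvEmit ((c :: rest).drop i)) ∘ Nat.succ)
          = (List.range rest.length).map (fun i => pvEmit (rest.drop i)) := by
        apply List.map_congr_left; intro i _; rfl
      rw [hmap, ← ih]
      show pvAGo (c :: rest) = pvEmit (c :: rest) ++ pvAGo rest
      rw [pvAGo, pvEmit]

-- ===== VERDICT (by name: the statement is the Claim_ definition above) =====
theorem get_digits_from_line_spec : Claim_equal_get_digits_from_line := by
  intro line _
  unfold Spec_get_digits_from_line get_digits_from_line get_digits_from_line_alt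
  have hstep : pvBStep line.toList = fun acc i => acc ++ pvEmit (line.toList.drop i) := by
    funext acc i; exact pvBStep_emit _ _ _
  rw [hstep, PySem.List.foldl_append_eq_flatMap, List.nil_append, pvAGo_eq_flatten,
    List.flatMap_def]
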